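-- pv_equiv track=rewrite | github.com/Vincent-Zhenhao-ZHAO/CodeChallenge | problems/PasswordChecker/TwoLoopMethod.py | Solution
-- ===== SOURCE A (Python) =====
-- def Solution(S):
--     def checkcurrent(S):
--         capital = False
--         currentlen = 0
--         for character in S:
--             if character.isupper():
--                 capital = True
--                 currentlen += 1
--             elif character.isdigit():
--                 if capital:
--                     return currentlen
--                 else:
--                     return 0
--             else:
--                 currentlen += 1
--         if capital == False:
--             return 0
--         else:
--             return currentlen
--
--     max = -1
--     for count in range(0,len(S)):
--         if not S[count].isdigit():
--             current = checkcurrent(S[count:])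
--             if current != 0 and current > max:
--                 max = current
--
--
--
--
--     return max
-- ===== SOURCE B (Python) =====
-- def Solution(S):
--     # Single linear pass: track current digit-free segment length and whether
--     # it contains an uppercase letter; the answer is the longest such segment.
--     best = -1
--     cur = 0
--     has_upper = False
--     for ch in S:
--         if ch.isdigit():
--             if has_upper:
--                 best = max(best, cur)
--             cur = 0
--             has_upper = False
--         else:
--             cur += 1
--             if ch.isupper():
--                 has_upper = True
--     if has_upper:
--         best = max(best, cur)
--     return best
-- ===== Notes on version B (the rewrite author's own statement) =====
-- stated objective: faster
-- what changed: Replaced the quadratic scheme (for every non-digit start position, rescan the suffix up to the next digit) by one linear pass that tracks the current digit-free segment's length and whether it has seen an uppercase letter, flushing the maximum at each digit and at the end.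
import Mathlib
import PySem

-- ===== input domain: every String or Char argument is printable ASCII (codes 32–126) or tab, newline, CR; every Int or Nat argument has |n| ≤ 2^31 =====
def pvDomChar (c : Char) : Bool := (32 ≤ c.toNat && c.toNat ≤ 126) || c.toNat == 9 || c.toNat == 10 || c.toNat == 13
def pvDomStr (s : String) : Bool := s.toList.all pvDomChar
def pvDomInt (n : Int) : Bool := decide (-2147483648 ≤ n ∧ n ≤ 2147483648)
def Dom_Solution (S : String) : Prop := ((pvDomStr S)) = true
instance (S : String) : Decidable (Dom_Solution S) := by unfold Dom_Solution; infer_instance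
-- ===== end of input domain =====

-- B is a single linear pass over the string instead of A's rescan from every non-digit position (faster: O(n) vs O(n^2)).

-- ===== PORT A =====
-- inner helper 'checkcurrent' of A, with its loop state (capital, currentlen) as accumulators
def Solution_check : List Char → Bool → Int → Int
  | [], capital, currentlen => if capital = false then 0 else currentlen
  | character :: rest, capital, currentlen =>
    if PySem.Chars.isupper character then Solution_check rest true (currentlen + 1)
    else if PySem.Chars.isdigit character then (if capital then currentlen else 0)
    else Solution_check rest capital (currentlen + 1)

def Solution (S : String) : Int :=
  (PySem.List.pyRange 0 (S.toList.length) 1).foldl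
    (fun m count =>
      match PySem.List.pyGet? S.toList count with
      | some c =>
        if ¬ PySem.Chars.isdigit c then
          let current := Solution_check (PySem.List.slice S.toList (some count) none) false 0
          if current ≠ 0 ∧ current > m then current else m
        else m
      | none => m)    -- unreachable: count ranges over valid indices
    (-1)

-- ===== PORT B =====
def Solution_alt (S : String) : Int :=
  let st := S.toList.foldl
    (fun (st : Int × Int × Bool) ch =>
      let (best, cur, hasUp) := st
      if PySem.Chars.isdigit ch then
        (if hasUp then max best cur else best, 0, false)
      else
        (best, cur + 1, hasUp || PySem.Chars.isupper ch))
    (-1, 0, false)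
  if st.2.2 then max st.1 st.2.1 else st.1

-- ===== PRECONDITION & SPEC =====
def Spec_Solution (S : String) (out : Int) : Prop := out = Solution_alt S
instance (S : String) (out : Int) : Decidable (Spec_Solution S out) := by unfold Spec_Solution; infer_instance

-- ===== CLAIM (what is proved, stated in full; the proofs are below) =====
def Claim_equal_Solution : Prop := ∀ (S : String), Dom_Solution S → Spec_Solution S (Solution S)

-- ===== LEMMAS AND PROOFS =====

theorem pvDigitNotUpper (c : Char) (h : PySem.Chars.isdigit c = true) :
    PySem.Chars.isupper c = false := by
  have h0 : ('0' : Char).val.toNat = 48 := by decide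
  have h9 : ('9' : Char).val.toNat = 57 := by decide
  have hA : ('A' : Char).val.toNat = 65 := by decide
  have hZ : ('Z' : Char).val.toNat = 90 := by decide
  simp only [PySem.Chars.isdigit, PySem.Chars.isupper, Bool.and_eq_true, decide_eq_true_eq,
    Bool.and_eq_false_iff, decide_eq_false_iff_not, Char.le_def,
    UInt32.le_iff_toNat_le, h0, h9, hA, hZ] at *
  omega

-- length of the digit-free prefix
def pvSeg : List Char → Int
  | [] => 0
  | c :: t => if PySem.Chars.isdigit c then 0 else pvSeg t + 1

-- does the digit-free prefix contain an uppercase letter?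
def pvGood : List Char → Bool
  | [] => false
  | c :: t => if PySem.Chars.isdigit c then false else (PySem.Chars.isupper c || pvGood t)

-- what remains after the first digit
def pvRest : List Char → List Char
  | [] => []
  | c :: t => if PySem.Chars.isdigit c then t else pvRest t

def pvV (l : List Char) : Int := if pvGood l then pvSeg l else -1

-- reference value: max over all suffix starts
def pvR : List Char → Int
  | [] => -1
  | c :: t => max (pvV (c :: t)) (pvR t)

theorem pvSeg_nonneg (l : List Char) : 0 ≤ pvSeg l := by
  induction l with
  | nil => simp [pvSeg]
  | cons c t ih => simp only [pvSeg]; split <;> omega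

theorem pvGood_seg_pos (l : List Char) (h : pvGood l = true) : 1 ≤ pvSeg l := by
  cases l with
  | nil => simp [pvGood] at h
  | cons c t =>
    simp only [pvGood] at h
    simp only [pvSeg]
    split
    · simp_all
    · have := pvSeg_nonneg t; omega

theorem pvR_ge (l : List Char) : -1 ≤ pvR l := by
  induction l with
  | nil => simp [pvR]
  | cons c t ih => simp only [pvR]; omega

theorem check_eq (l : List Char) : ∀ (cap : Bool) (n : Int),
    Solution_check l cap n = if (cap || pvGood l) = true then n + pvSeg l else 0 := by
  induction l with
  | nil => intro cap n; cases cap <;> simp [Solution_check, pvGood, pvSeg]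
  | cons c t ih =>
    intro cap n
    by_cases hu : PySem.Chars.isupper c
    · have hd : PySem.Chars.isdigit c = false := by
        cases h : PySem.Chars.isdigit c
        · rfl
        · exact absurd (pvDigitNotUpper c h) (by simp [hu])
      simp only [Solution_check, pvGood, pvSeg, hu, hd, if_true, Bool.false_eq_true, if_false, ih]
      cases cap <;> simp <;> ring
    · by_cases hd : PySem.Chars.isdigit c
      · simp only [Solution_check, pvGood, pvSeg, hu, hd, Bool.false_eq_true, if_false, if_true]
        cases cap <;> simp
      · simp only [Solution_check, pvGood, pvSeg, hu, hd, Bool.false_eq_true, if_false, ih]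
        cases cap <;> cases h2 : pvGood t <;> simp <;> ring

-- pvR absorbs the rest of the list: pvR l = max (pvV l) (pvR (pvRest l))
theorem pvR_decomp (l : List Char) : pvR l = max (pvV l) (pvR (pvRest l)) := by
  induction l with
  | nil => simp [pvR, pvV, pvGood, pvRest]
  | cons c t ih =>
    by_cases hd : PySem.Chars.isdigit c
    · have hg : pvGood (c :: t) = false := by simp [pvGood, hd]
      have hr : pvRest (c :: t) = t := by simp [pvRest, hd]
      have hv : pvV (c :: t) = -1 := by simp [pvV, hg]
      rw [hr, hv]
      simp only [pvR, hv]
    · have hr : pvRest (c :: t) = pvRest t := by simp [pvRest, hd]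
      rw [hr]
      simp only [pvR, ih]
      have habs : pvV t ≤ max (pvV (c :: t)) (pvR (pvRest t)) := by
        by_cases hg : pvGood t
        · have h1 : pvGood (c :: t) = true := by simp [pvGood, hd, hg]
          have h2 : pvSeg (c :: t) = pvSeg t + 1 := by simp [pvSeg, hd]
          simp only [pvV, hg, if_true, h1, h2]
          omega
        · have hg' : pvGood t = false := by cases h : pvGood t; rfl; exact absurd h hg
          simp only [pvV, hg', Bool.false_eq_true, if_false]
          have := pvR_ge (pvRest t)
          omega
      omega

-- the per-index step of A's outer loop, on the list side
def pvGStep (t : List Char) (m : Int) (k : Nat) : Int :=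
  match t[k]? with
  | some c =>
    if ¬ PySem.Chars.isdigit c then
      let current := Solution_check (t.drop k) false 0
      if current ≠ 0 ∧ current > m then current else m
    else m
  | none => m

theorem gstep_zero (l : List Char) (m : Int) (hm : -1 ≤ m) (c : Char) (t : List Char)
    (hl : l = c :: t) : pvGStep l m 0 = max m (pvV l) := by
  subst hl
  simp only [pvGStep, List.getElem?_cons_zero, List.drop_zero]
  by_cases hd : PySem.Chars.isdigit c = true
  · have hg : pvGood (c :: t) = false := by simp [pvGood, hd]
    rw [if_neg (by simp [hd])]
    simp only [pvV, hg, Bool.false_eq_true, if_false]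
    omega
  · rw [if_pos hd]
    simp only [check_eq, Bool.false_or, zero_add]
    by_cases hg : pvGood (c :: t) = true
    · have h1 : 1 ≤ pvSeg (c :: t) := pvGood_seg_pos _ hg
      rw [if_pos hg]
      simp only [pvV]
      rw [if_pos hg]
      by_cases h2 : pvSeg (c :: t) > m
      · rw [if_pos ⟨by omega, h2⟩]; omega
      · rw [if_neg (fun h => h2 h.2)]; omega
    · rw [if_neg hg]
      simp only [pvV]
      rw [if_neg hg]
      rw [if_neg (fun h => h.1 rfl)]
      omega

theorem gstep_succ (c : Char) (t : List Char) (m : Int) (k : Nat) :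
    pvGStep (c :: t) m (k + 1) = pvGStep t m k := by
  simp only [pvGStep, List.getElem?_cons_succ, List.drop_succ_cons]

theorem g_fold (l : List Char) : ∀ (a : Int), -1 ≤ a →
    (List.range l.length).foldl (pvGStep l) a = max a (pvR l) := by
  induction l with
  | nil => intro a ha; simp [pvR]; omega
  | cons c t ih =>
    intro a ha
    rw [List.length_cons, List.range_succ_eq_map, List.foldl_cons, List.foldl_map]
    have h0 : pvGStep (c :: t) a 0 = max a (pvV (c :: t)) := gstep_zero _ a ha c t rfl
    have hcongr : (List.range t.length).foldl (fun m k => pvGStep (c :: t) m (Nat.succ k))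
        (pvGStep (c :: t) a 0) = (List.range t.length).foldl (pvGStep t) (pvGStep (c :: t) a 0) :=
      PySem.List.foldl_congr_mem _ _ _ _ (fun m k _ => gstep_succ c t m k)
    have hinit : -1 ≤ pvGStep (c :: t) a 0 := by
      rw [h0]; omega
    rw [hcongr, ih _ hinit, h0]
    simp only [pvR]
    omega

theorem A_eq_R (S : String) : Solution S = pvR S.toList := by
  unfold Solution
  rw [PySem.List.pyRange_one, List.foldl_map]
  have hn : (((S.toList.length : Int)) - 0).toNat = S.toList.length := by omega
  rw [hn]
  have h2 : (List.range S.toList.length).foldl (pvGStep S.toList) (-1) = max (-1) (pvR S.toList) :=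
    g_fold _ _ (by omega)
  refine Eq.trans (PySem.List.foldl_congr_mem _ _ (pvGStep S.toList) (-1) ?_) (h2.trans (by have := pvR_ge S.toList; omega))
  intro acc k _
  have h1 : ((0 : Int) + (k : Int)) = ((k : Int)) := by omega
  simp only [h1, PySem.List.pyGet?_natCast,
    PySem.List.slice_from S.toList (Int.natCast_nonneg k), Int.toNat_natCast, pvGStep]

-- B's loop step
def pvBStep (st : Int × Int × Bool) (ch : Char) : Int × Int × Bool :=
  let (best, cur, hasUp) := st
  if PySem.Chars.isdigit ch then
    (if hasUp then max best cur else best, 0, false)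
  else
    (best, cur + 1, hasUp || PySem.Chars.isupper ch)

theorem B_inv (l : List Char) : ∀ (best cur : Int) (up : Bool), -1 ≤ best → 0 ≤ cur →
    (let st := l.foldl pvBStep (best, cur, up);
     if st.2.2 then max st.1 st.2.1 else st.1)
    = max best (max (if (up || pvGood l) = true then cur + pvSeg l else -1) (pvR (pvRest l))) := by
  induction l with
  | nil =>
    intro best cur up hb hc
    cases up <;> simp [pvGood, pvSeg, pvRest, pvR] <;> omega
  | cons c t ih =>
    intro best cur up hb hc
    by_cases hd : PySem.Chars.isdigit c = true
    · have hG : pvGood (c :: t) = false := by simp [pvGood, hd]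
      have hS : pvSeg (c :: t) = 0 := by simp [pvSeg, hd]
      have hR : pvRest (c :: t) = t := by simp [pvRest, hd]
      have hstep : pvBStep (best, cur, up) c = (if up then max best cur else best, 0, false) := by
        simp [pvBStep, hd]
      simp only [List.foldl_cons, hstep]
      rw [ih (if up then max best cur else best) 0 false (by split <;> omega) (by omega)]
      rw [hG, hS, hR, pvR_decomp t]
      have h1 := pvR_ge (pvRest t)
      have h2 := pvSeg_nonneg t
      cases hgt : pvGood t <;> cases up <;> simp [pvV, hgt] <;> omega
    · have hG : pvGood (c :: t) = (PySem.Chars.isupper c || pvGood t) := by simp [pvGood, hd]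
      have hS : pvSeg (c :: t) = pvSeg t + 1 := by simp [pvSeg, hd]
      have hR : pvRest (c :: t) = pvRest t := by simp [pvRest, hd]
      have hstep : pvBStep (best, cur, up) c = (best, cur + 1, up || PySem.Chars.isupper c) := by
        simp [pvBStep, hd]
      simp only [List.foldl_cons, hstep]
      rw [ih best (cur + 1) (up || PySem.Chars.isupper c) hb (by omega)]
      rw [hG, hS, hR]
      cases up <;> cases hu : PySem.Chars.isupper c <;> cases hgt : pvGood t <;>
        simp [hu, hgt] <;> omega

theorem B_eq_R (S : String) : Solution_alt S = pvR S.toList := by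
  unfold Solution_alt
  have hfun : (fun (st : Int × Int × Bool) ch =>
      let (best, cur, hasUp) := st
      if PySem.Chars.isdigit ch then
        (if hasUp then max best cur else best, 0, false)
      else
        (best, cur + 1, hasUp || PySem.Chars.isupper ch)) = pvBStep := by
    funext st ch; rfl
  rw [hfun]
  have h := B_inv S.toList (-1) 0 false (by omega) (by omega)
  simp only at h
  rw [h, pvR_decomp S.toList]
  have h1 := pvR_ge (pvRest S.toList)
  have h2 := pvSeg_nonneg S.toList
  cases hg : pvGood S.toList <;> simp [pvV, hg] <;> omega

-- ===== VERDICT (by name: the statement is the Claim_ definition above) =====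
theorem Solution_spec : Claim_equal_Solution := by
  intro S _
  unfold Spec_Solution
  rw [A_eq_R, B_eq_R]
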